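-- pv_equiv track=rewrite | github.com/bookofwireless/mini-pitft | stats.py | signal_to_bars
-- ===== SOURCE A (Python) =====
-- def signal_to_bars(signal):
--     bars = ['\u2581', '\u2583', '\u2585', '\u2587']
--     ranges = [
--         (-100, -80), # 1 bar
--         (-79, -67),  # 2 bars
--         (-66, -56),  # 3 bars
--         (-55, -30)   # 4 bars
--     ]
--     signal = int(signal) # cast to integer
--     series = ""
--     for i, (lower, upper) in enumerate(ranges):
--         if signal >= lower:
--             series += bars[i]
--         else:
--             break
--     return series
-- ===== SOURCE B (Python) =====
-- def signal_to_bars(sig):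
--     s = int(sig)
--     n = (s >= -100) + (s >= -79) + (s >= -66) + (s >= -55)
--     return '\u2581\u2583\u2585\u2587'[:n]
-- ===== Notes on version B (the rewrite author's own statement) =====
-- stated objective: simpler
-- what changed: Replaced the enumerate-and-break accumulation loop with a branch-free count of thresholds <= int(signal) followed by a single slice of the constant bar string.
import Mathlib
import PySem

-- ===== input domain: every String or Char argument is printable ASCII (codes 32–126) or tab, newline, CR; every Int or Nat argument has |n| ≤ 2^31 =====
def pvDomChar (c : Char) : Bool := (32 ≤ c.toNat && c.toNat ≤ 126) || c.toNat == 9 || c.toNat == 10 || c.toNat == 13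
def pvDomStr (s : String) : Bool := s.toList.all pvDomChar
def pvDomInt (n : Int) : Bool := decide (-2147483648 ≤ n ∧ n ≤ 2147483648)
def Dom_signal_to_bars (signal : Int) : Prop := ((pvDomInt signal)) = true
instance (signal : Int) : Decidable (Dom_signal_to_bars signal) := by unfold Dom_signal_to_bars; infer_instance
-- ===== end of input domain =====

-- B replaces A's enumerate-and-break loop by a branch-free count of satisfied
-- thresholds plus one string slice (objective: simpler / idiomatic).


-- ===== PORT A =====
-- the for-loop with break over enumerate(ranges); bars[i] is always in range
-- here (i < 4), so pyGetD's default "" is never used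
def signal_to_bars_loop (signal : Int) (bars : List String) :
    List (Int × Int) → Nat → String → String
  | [], _, series => series
  | (lower, _upper) :: rest, i, series =>
      if signal ≥ lower then
        signal_to_bars_loop signal bars rest (i + 1)
          (series ++ PySem.List.pyGetD bars (i : Int) "")
      else series

def signal_to_bars (signal : Int) : String :=
  let bars : List String := ["▁", "▃", "▅", "▇"]
  let ranges : List (Int × Int) := [(-100, -80), (-79, -67), (-66, -56), (-55, -30)]
  -- signal = int(signal): identity on an Int argument
  signal_to_bars_loop signal bars ranges 0 ""

-- ===== PORT B =====
def signal_to_bars_alt (signal : Int) : String :=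
  let s : Int := signal  -- int(signal)
  let n : Int := (if s ≥ -100 then 1 else 0) + (if s ≥ -79 then 1 else 0)
             + (if s ≥ -66 then 1 else 0) + (if s ≥ -55 then 1 else 0)
  PySem.Str.slice "▁▃▅▇" none (some n)

-- ===== PRECONDITION & SPEC =====
def Spec_signal_to_bars (signal : Int) (out : String) : Prop := out = signal_to_bars_alt signal
instance (signal : Int) (out : String) : Decidable (Spec_signal_to_bars signal out) := by unfold Spec_signal_to_bars; infer_instance

-- ===== CLAIM (what is proved, stated in full; the proofs are below) =====
def Claim_equal_signal_to_bars : Prop := ∀ (signal : Int), Dom_signal_to_bars signal → Spec_signal_to_bars signal (signal_to_bars signal)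

-- ===== LEMMAS AND PROOFS =====

-- ===== VERDICT (by name: the statement is the Claim_ definition above) =====
theorem signal_to_bars_spec : Claim_equal_signal_to_bars := by
  intro s _
  unfold Spec_signal_to_bars signal_to_bars signal_to_bars_alt
  simp only [signal_to_bars_loop]
  split_ifs with h1 h2 h3 h4 <;> first | rfl | omega
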